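-- pv_equiv track=rewrite | github.com/Doniol/Tinkers-Algo | algo.py | parents_selector
-- ===== SOURCE A (Python) =====
-- def parents_selector(population):
--     parents = []
--     for score_index in range(0, len(population), 2):
--         if score_index + 1 == len(population):
--             parents.append(population[score_index][1])
--             break
--         if population[score_index][0] > population[score_index + 1][0]:
--             parents.append(population[score_index][1])
--         else:
--             parents.append(population[score_index + 1][1])
--     return parents
-- ===== SOURCE B (Python) =====
-- def parents_selector(population):
--     if len(population) < 2:
--         return [p[1] for p in population]
--     winner = max(population[1], population[0], key=lambda t: t[0])
--     return [winner[1]] + parents_selector(population[2:])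
-- ===== Notes on version B (the rewrite author's own statement) =====
-- stated objective: alternative
-- what changed: Replaces the index loop over range(0,len,2) with its in-loop boundary break by structural recursion that consumes two elements at a time, selecting each winner with Python's two-argument max (ordered so ties pick the second element).
import Mathlib
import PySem

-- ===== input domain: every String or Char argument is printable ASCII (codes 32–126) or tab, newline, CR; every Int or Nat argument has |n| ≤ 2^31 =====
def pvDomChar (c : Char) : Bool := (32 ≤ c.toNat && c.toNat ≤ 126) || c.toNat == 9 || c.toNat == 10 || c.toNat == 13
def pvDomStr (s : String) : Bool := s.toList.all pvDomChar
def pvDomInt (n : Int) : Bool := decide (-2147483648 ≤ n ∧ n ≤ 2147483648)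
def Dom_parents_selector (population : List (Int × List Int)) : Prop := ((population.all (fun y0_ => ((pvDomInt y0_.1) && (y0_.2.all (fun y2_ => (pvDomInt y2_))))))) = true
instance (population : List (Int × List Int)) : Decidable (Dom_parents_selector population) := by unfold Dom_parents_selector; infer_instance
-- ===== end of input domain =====

-- B replaces A's index loop (range(0,len,2) with an in-loop boundary break) by structural
-- recursion consuming two elements at a time, winners picked via two-argument max; objective: alternative.

-- ===== PORT A =====
-- loop over range(0, len(population), 2); the 'break' branch returns the accumulator directly
def pvLoopA (pop : List (Int × List Int)) : List Int → List (List Int) → List (List Int)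
  | [], parents => parents
  | i :: rest, parents =>
    if i + 1 = (pop.length : Int) then parents ++ [(PySem.List.pyGetD pop i (0, [])).2]
    else if (PySem.List.pyGetD pop i (0, [])).1 > (PySem.List.pyGetD pop (i + 1) (0, [])).1 then
      pvLoopA pop rest (parents ++ [(PySem.List.pyGetD pop i (0, [])).2])
    else
      pvLoopA pop rest (parents ++ [(PySem.List.pyGetD pop (i + 1) (0, [])).2])

def parents_selector (population : List (Int × List Int)) : List (List Int) :=
  pvLoopA population (PySem.List.pyRange 0 (population.length : Int) 2) []

-- ===== PORT B =====
-- Source B: len<2 base case returns [p[1] for p in population]; otherwise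
-- winner = max(population[1], population[0], key=fst)  (Python max: first argument wins ties,
-- so this is population[1] when population[1][0] ≥ population[0][0], else population[0]),
-- then recurse on population[2:].
def parents_selector_alt : List (Int × List Int) → List (List Int)
  | [] => []
  | [p] => [p.2]
  | a :: b :: rest => (if b.1 ≥ a.1 then b else a).2 :: parents_selector_alt rest

-- ===== PRECONDITION & SPEC =====
def Spec_parents_selector (population : List (Int × List Int)) (out : List (List Int)) : Prop := out = parents_selector_alt population
instance (population : List (Int × List Int)) (out : List (List Int)) : Decidable (Spec_parents_selector population out) := by unfold Spec_parents_selector; infer_instance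

-- ===== CLAIM (what is proved, stated in full; the proofs are below) =====
def Claim_equal_parents_selector : Prop := ∀ (population : List (Int × List Int)), Dom_parents_selector population → Spec_parents_selector population (parents_selector population)

-- ===== LEMMAS AND PROOFS =====

lemma loopA_acc (pop : List (Int × List Int)) :
    ∀ (is : List Int) (acc : List (List Int)), pvLoopA pop is acc = acc ++ pvLoopA pop is []
  | [], acc => by simp [pvLoopA]
  | i :: rest, acc => by
    simp only [pvLoopA]
    split_ifs with h1 h2
    · simp
    · rw [loopA_acc pop rest (acc ++ _), loopA_acc pop rest ([] ++ _)]
      simp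
    · rw [loopA_acc pop rest (acc ++ _), loopA_acc pop rest ([] ++ _)]
      simp

lemma pyGetD_shift2 (x y : Int × List Int) (pop : List (Int × List Int)) (k : Nat) (d : Int × List Int) :
    PySem.List.pyGetD (x :: y :: pop) ((k : Int) + 2) d = PySem.List.pyGetD pop (k : Int) d := by
  have h : ((k : Int) + 2) = ((k + 2 : Nat) : Int) := by push_cast; ring
  rw [h, PySem.List.pyGetD_natCast, PySem.List.pyGetD_natCast]
  simp [List.getD]

lemma loopA_shift (x y : Int × List Int) (pop : List (Int × List Int)) :
    ∀ (is : List Int) (acc : List (List Int)), (∀ i ∈ is, 0 ≤ i) →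
      pvLoopA (x :: y :: pop) (is.map (· + 2)) acc = pvLoopA pop is acc
  | [], acc, _ => by simp [pvLoopA]
  | i :: rest, acc, h => by
    have hi : 0 ≤ i := h i (by simp)
    obtain ⟨k, rfl⟩ := Int.eq_ofNat_of_zero_le hi
    have hrest : ∀ j ∈ rest, 0 ≤ j := fun j hj => h j (by simp [hj])
    simp only [List.map_cons, pvLoopA]
    have hlen : ((x :: y :: pop).length : Int) = (pop.length : Int) + 2 := by
      simp; ring
    have hcond : ((k : Int) + 2 + 1 = ((x :: y :: pop).length : Int)) ↔ ((k : Int) + 1 = (pop.length : Int)) := by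
      rw [hlen]; omega
    have hg1 := pyGetD_shift2 x y pop k ((0 : Int), ([] : List Int))
    have hg2 : PySem.List.pyGetD (x :: y :: pop) ((k : Int) + 2 + 1) ((0:Int), ([]:List Int)) = PySem.List.pyGetD pop ((k : Int) + 1) ((0:Int), ([]:List Int)) := by
      have h2 : ((k : Int) + 2 + 1) = (((k + 1 : Nat) : Int) + 2) := by push_cast; ring
      rw [h2, pyGetD_shift2]
      push_cast; ring_nf
    rw [hg1, hg2]
    by_cases h1 : (k : Int) + 1 = (pop.length : Int)
    · rw [if_pos (hcond.mpr h1), if_pos h1]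
    · rw [if_neg (fun hc => h1 (hcond.mp hc)), if_neg h1]
      split_ifs with h2 <;> exact loopA_shift x y pop rest _ hrest

lemma pyRange_two (n : Nat) :
    PySem.List.pyRange 0 ((n : Int) + 2) 2 = 0 :: (PySem.List.pyRange 0 (n : Int) 2).map (· + 2) := by
  simp only [PySem.List.pyRange]
  norm_num
  have hL : (if (0:Int) < ↑n + 2 then (((n:Int) + 2 + 2 - 1) / 2).toNat else 0) = (n+1)/2 + 1 := by
    split_ifs with h <;> omega
  have hR : (if 0 < n then (((n:Int) + 2 - 1) / 2).toNat else 0) = (n+1)/2 := by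
    split_ifs with h <;> omega
  rw [hL, hR, List.range_succ_eq_map, List.map_cons, List.map_map]
  norm_num
  intro a _
  ring

lemma pyRange_two_nonneg (n : Nat) : ∀ i ∈ PySem.List.pyRange 0 (n : Int) 2, 0 ≤ i := by
  intro i hi
  simp only [PySem.List.pyRange] at hi
  norm_num at hi
  obtain ⟨k, _, rfl⟩ := hi
  positivity

lemma A_nil : parents_selector [] = [] := by decide

lemma A_single (x : Int × List Int) : parents_selector [x] = [x.2] := by
  have h : PySem.List.pyRange 0 ((1 : Nat) : Int) 2 = [0] := by decide
  simp only [parents_selector, List.length_singleton, h, pvLoopA]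
  norm_num

lemma A_cons2 (x y : Int × List Int) (r : List (Int × List Int)) :
    parents_selector (x :: y :: r) = (if x.1 > y.1 then x.2 else y.2) :: parents_selector r := by
  unfold parents_selector
  have hlen : (((x :: y :: r).length : Nat) : Int) = (r.length : Int) + 2 := by
    simp [List.length_cons]; ring
  rw [hlen, pyRange_two]
  rw [show pvLoopA (x :: y :: r) (0 :: (PySem.List.pyRange 0 (r.length : Int) 2).map (· + 2)) []
      = (if (0:Int) + 1 = ((x :: y :: r).length : Int) then [] ++ [(PySem.List.pyGetD (x :: y :: r) 0 (0, [])).2]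
         else if (PySem.List.pyGetD (x :: y :: r) 0 (0, [])).1 > (PySem.List.pyGetD (x :: y :: r) (0 + 1) (0, [])).1 then
           pvLoopA (x :: y :: r) ((PySem.List.pyRange 0 (r.length : Int) 2).map (· + 2)) ([] ++ [(PySem.List.pyGetD (x :: y :: r) 0 (0, [])).2])
         else
           pvLoopA (x :: y :: r) ((PySem.List.pyRange 0 (r.length : Int) 2).map (· + 2)) ([] ++ [(PySem.List.pyGetD (x :: y :: r) (0 + 1) (0, [])).2])) from rfl]
  rw [if_neg (by rw [hlen]; omega)]
  have hg0 : PySem.List.pyGetD (x :: y :: r) 0 (0, []) = x := by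
    simp [PySem.List.pyGetD, PySem.List.pyGet?, PySem.List.pyIdx?]
    rw [if_pos (by omega : (0:Int) ≤ (r.length : Int) + 1)]
    rfl
  have hg1 : PySem.List.pyGetD (x :: y :: r) (0 + 1) (0, []) = y := by
    simp [PySem.List.pyGetD, PySem.List.pyGet?, PySem.List.pyIdx?]
  rw [hg0, hg1]
  rw [loopA_shift x y r _ _ (pyRange_two_nonneg r.length),
      loopA_shift x y r _ _ (pyRange_two_nonneg r.length)]
  rw [loopA_acc r _ ([] ++ [x.2]), loopA_acc r _ ([] ++ [y.2])]
  split_ifs with h <;> simp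

lemma agree : ∀ pop : List (Int × List Int), parents_selector pop = parents_selector_alt pop
  | [] => A_nil
  | [x] => by rw [A_single]; rfl
  | x :: y :: r => by
    rw [A_cons2, agree r]
    show (if x.1 > y.1 then x.2 else y.2) :: _ = (if y.1 ≥ x.1 then y else x).2 :: _
    by_cases h : x.1 > y.1
    · rw [if_pos h, if_neg (by omega)]
    · rw [if_neg h, if_pos (by omega)]

-- ===== VERDICT (by name: the statement is the Claim_ definition above) =====
theorem parents_selector_spec : Claim_equal_parents_selector := by
  intro population _
  unfold Spec_parents_selector
  exact agree population
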